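-- pv_equiv track=rewrite | github.com/ChengTang62/reWeFDE | preprocess/features/KFingerprint.py | _extract_bursts
-- ===== SOURCE A (Python) =====
-- def _extract_bursts(times, sizes):
--     """Return list of bursts; each burst is list of (t, s) for consecutive same-direction packets."""
--     if not sizes:
--         return []
--     bursts = []
--     current = [(times[0], sizes[0])]
--     for i in range(1, len(sizes)):
--         if (sizes[i] > 0) == (sizes[i - 1] > 0):
--             current.append((times[i], sizes[i]))
--         else:
--             bursts.append(current)
--             current = [(times[i], sizes[i])]
--     if current:
--         bursts.append(current)
--     return bursts
-- ===== SOURCE B (Python) =====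
-- def _extract_bursts(times, sizes):
--     """Return list of bursts; each burst is list of (t, s) for consecutive same-direction packets."""
--     pairs = [(times[i], sizes[i]) for i in range(len(sizes))]
--     bursts = []
--     i, n = 0, len(pairs)
--     while i < n:
--         d = pairs[i][1] > 0
--         j = i + 1
--         while j < n and (pairs[j][1] > 0) == d:
--             j += 1
--         bursts.append(pairs[i:j])
--         i = j
--     return bursts
-- ===== Notes on version B (the rewrite author's own statement) =====
-- stated objective: alternative
-- what changed: B builds the (time, size) pair list once by index, then finds each burst by scanning to the end of its run and slicing pairs[i:j], instead of A's element-by-element loop that maintains a 'current' accumulator, compares sizes[i]>0 with sizes[i-1]>0, and flushes the last burst after the loop.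
import Mathlib
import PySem

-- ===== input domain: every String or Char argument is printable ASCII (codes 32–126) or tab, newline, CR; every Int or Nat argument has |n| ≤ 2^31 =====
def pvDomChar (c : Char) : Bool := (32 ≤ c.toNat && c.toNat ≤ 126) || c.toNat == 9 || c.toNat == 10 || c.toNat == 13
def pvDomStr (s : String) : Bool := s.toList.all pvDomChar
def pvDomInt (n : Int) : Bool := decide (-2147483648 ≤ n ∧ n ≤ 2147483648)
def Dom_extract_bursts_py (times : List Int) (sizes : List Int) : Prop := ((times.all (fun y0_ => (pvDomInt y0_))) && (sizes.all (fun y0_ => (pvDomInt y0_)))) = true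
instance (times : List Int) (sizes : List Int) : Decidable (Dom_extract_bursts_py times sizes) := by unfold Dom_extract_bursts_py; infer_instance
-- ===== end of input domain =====

-- B groups consecutive same-direction packets by scanning to each run's end and slicing an
-- index-built pair list (alternative decomposition, same O(n) cost); A's accumulator loop is
-- ported literally.

-- ===== PORT A =====
def extract_bursts_py (times : List Int) (sizes : List Int) : List (List (Int × Int)) :=
  if sizes = [] then []
  else
    -- indexing ported with pyGetD: exact on Pre_ (every index is in range there)
    let st :=
      (PySem.List.pyRange 1 (PySem.List.len sizes) 1).foldl
        (fun (st : List (List (Int × Int)) × List (Int × Int)) i =>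
          if (decide (PySem.List.pyGetD sizes i 0 > 0)) = (decide (PySem.List.pyGetD sizes (i - 1) 0 > 0)) then
            (st.1, st.2 ++ [(PySem.List.pyGetD times i 0, PySem.List.pyGetD sizes i 0)])
          else
            (st.1 ++ [st.2], [(PySem.List.pyGetD times i 0, PySem.List.pyGetD sizes i 0)]))
        ([], [(PySem.List.pyGetD times 0 0, PySem.List.pyGetD sizes 0 0)])
    if st.2 ≠ [] then st.1 ++ [st.2] else st.1

-- ===== PORT B =====
-- inner while loop of Source B: advance j while pairs[j] keeps direction d
def pvRunEnd (pairs : List (Int × Int)) (d : Bool) (j : Nat) : Nat :=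
  if h : j < pairs.length then
    if decide ((pairs[j]'h).2 > 0) = d then pvRunEnd pairs d (j + 1) else j
  else j
termination_by pairs.length - j

-- termination fact for the outer while loop (cited in pvBursts' decreasing_by)
theorem le_pvRunEnd (pairs : List (Int × Int)) (d : Bool) (j : Nat) : j ≤ pvRunEnd pairs d j := by
  unfold pvRunEnd
  split
  · split
    · exact le_trans (Nat.le_succ j) (le_pvRunEnd pairs d (j + 1))
    · exact le_refl j
  · exact le_refl j
termination_by pairs.length - j

-- outer while loop of Source B over burst start indices
def pvBursts (pairs : List (Int × Int)) (i : Nat) : List (List (Int × Int)) :=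
  if h : i < pairs.length then
    let j := pvRunEnd pairs (decide ((pairs[i]'h).2 > 0)) (i + 1)
    PySem.List.slice pairs (some (i : Int)) (some (j : Int)) :: pvBursts pairs j
  else []
termination_by pairs.length - i
decreasing_by
  have := le_pvRunEnd pairs (decide ((pairs[i]'h).2 > 0)) (i + 1)
  omega

def extract_bursts_py_alt (times : List Int) (sizes : List Int) : List (List (Int × Int)) :=
  -- pairs = [(times[i], sizes[i]) for i in range(len(sizes))]; indexing via pyGetD is exact on Pre_
  let pairs := (List.range sizes.length).map
    (fun (i : Nat) => (PySem.List.pyGetD times (i : Int) 0, PySem.List.pyGetD sizes (i : Int) 0))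
  pvBursts pairs 0

-- ===== PRECONDITION & SPEC =====
-- Pre_ excludes exactly the inputs on which both A and B raise IndexError:
-- sizes nonempty with times shorter than sizes.
def Pre_extract_bursts_py (times : List Int) (sizes : List Int) : Prop :=
  sizes = [] ∨ sizes.length ≤ times.length
instance (times : List Int) (sizes : List Int) : Decidable (Pre_extract_bursts_py times sizes) := by
  unfold Pre_extract_bursts_py; infer_instance

def pvWitness_extract_bursts_py : List Int × List Int := ([1, 2, 3, 4], [5, -1, -2, 7])

def Spec_extract_bursts_py (times : List Int) (sizes : List Int) (out : List (List (Int × Int))) : Prop := out = extract_bursts_py_alt times sizes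
instance (times : List Int) (sizes : List Int) (out : List (List (Int × Int))) : Decidable (Spec_extract_bursts_py times sizes out) := by unfold Spec_extract_bursts_py; infer_instance

-- ===== CLAIM (what is proved, stated in full; the proofs are below) =====
def Claim_equal_extract_bursts_py : Prop := ∀ (times : List Int) (sizes : List Int), Dom_extract_bursts_py times sizes → Pre_extract_bursts_py times sizes → Spec_extract_bursts_py times sizes (extract_bursts_py times sizes)

-- ===== LEMMAS AND PROOFS =====

-- on Pre_, B's index-built pair list is exactly zip times sizes
theorem pairs_eq_zip (ts ss : List Int) (h : ss.length ≤ ts.length) :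
    (List.range ss.length).map
      (fun (i : Nat) => (PySem.List.pyGetD ts (i : Int) 0, PySem.List.pyGetD ss (i : Int) 0))
    = List.zip ts ss := by
  apply List.ext_getElem
  · simp; omega
  · intro i h1 h2
    have hiss : i < ss.length := by simpa using h1
    have hits : i < ts.length := by omega
    rw [List.getElem_map, List.getElem_range, List.getElem_zip,
      PySem.List.pyGetD_natCast, PySem.List.pyGetD_natCast,
      List.getD_eq_getElem _ _ hiss, List.getD_eq_getElem _ _ hits]

-- reference grouping: head plus its run, then recurse on the remainder
def pvGrp : List (Int × Int) → List (List (Int × Int))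
  | [] => []
  | p :: r =>
    (p :: r.takeWhile (fun q => decide (q.2 > 0) = decide (p.2 > 0))) ::
      pvGrp (r.dropWhile (fun q => decide (q.2 > 0) = decide (p.2 > 0)))
termination_by l => l.length
decreasing_by
  have := List.length_dropWhile_le (fun q => decide (q.2 > 0) = decide (p.2 > 0)) r
  simp; omega

theorem pvGrp_cons (p : Int × Int) (r : List (Int × Int)) :
    pvGrp (p :: r) =
      (p :: r.takeWhile (fun q => decide (q.2 > 0) = decide (p.2 > 0))) ::
        pvGrp (r.dropWhile (fun q => decide (q.2 > 0) = decide (p.2 > 0))) := by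
  rw [pvGrp.eq_def]

theorem take_len_takeWhile {α : Type} (p : α → Bool) (l : List α) :
    l.take (l.takeWhile p).length = l.takeWhile p := by
  induction l with
  | nil => rfl
  | cons x xs ih =>
    by_cases h : p x
    · simp [h, ih]
    · simp [h]

theorem drop_len_takeWhile {α : Type} (p : α → Bool) (l : List α) :
    l.drop (l.takeWhile p).length = l.dropWhile p := by
  induction l with
  | nil => rfl
  | cons x xs ih =>
    by_cases h : p x
    · simp [List.takeWhile_cons, h, ih]
    · simp [List.takeWhile_cons, h]

theorem pvRunEnd_eq (pairs : List (Int × Int)) (d : Bool) (j : Nat) (hj : j ≤ pairs.length) :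
    pvRunEnd pairs d j = j + ((pairs.drop j).takeWhile (fun q => decide (q.2 > 0) = d)).length := by
  unfold pvRunEnd
  by_cases h : j < pairs.length
  · rw [dif_pos h, List.drop_eq_getElem_cons h, List.takeWhile_cons]
    by_cases hd : decide ((pairs[j]'h).2 > 0) = d
    · rw [if_pos hd, pvRunEnd_eq pairs d (j + 1) (by omega)]
      simp [hd]
      omega
    · rw [if_neg hd]
      simp [hd]
  · rw [dif_neg h]
    have hnil : pairs.drop j = [] := List.drop_eq_nil_of_le (by omega)
    simp [hnil]
termination_by pairs.length - j

theorem pvBursts_eq (pairs : List (Int × Int)) (i : Nat) (hi : i ≤ pairs.length) :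
    pvBursts pairs i = pvGrp (pairs.drop i) := by
  unfold pvBursts
  by_cases h : i < pairs.length
  · rw [dif_pos h]
    have hdrop := List.drop_eq_getElem_cons h
    have hrun := pvRunEnd_eq pairs (decide ((pairs[i]'h).2 > 0)) (i + 1) (by omega)
    have htwle : ((pairs.drop (i + 1)).takeWhile
        (fun q => decide (q.2 > 0) = decide ((pairs[i]'h).2 > 0))).length ≤ pairs.length - (i + 1) := by
      have hsub := (List.takeWhile_sublist
        (l := pairs.drop (i + 1)) (fun q => decide (q.2 > 0) = decide ((pairs[i]'h).2 > 0))).length_le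
      simp at hsub
      omega
    have hjle : pvRunEnd pairs (decide ((pairs[i]'h).2 > 0)) (i + 1) ≤ pairs.length := by
      rw [hrun]; omega
    have hslice : PySem.List.slice pairs (some (i : Int))
        (some ((pvRunEnd pairs (decide ((pairs[i]'h).2 > 0)) (i + 1) : Nat) : Int))
        = (pairs[i]'h) :: (pairs.drop (i + 1)).takeWhile
            (fun q => decide (q.2 > 0) = decide ((pairs[i]'h).2 > 0)) := by
      rw [PySem.List.slice_natCast, hrun, hdrop,
        show i + 1 + ((pairs.drop (i + 1)).takeWhile
          (fun q => decide (q.2 > 0) = decide ((pairs[i]'h).2 > 0))).length - i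
          = ((pairs.drop (i + 1)).takeWhile
          (fun q => decide (q.2 > 0) = decide ((pairs[i]'h).2 > 0))).length + 1 from by omega,
        List.take_succ_cons, take_len_takeWhile]
    have hdropj : pairs.drop (pvRunEnd pairs (decide ((pairs[i]'h).2 > 0)) (i + 1))
        = (pairs.drop (i + 1)).dropWhile
            (fun q => decide (q.2 > 0) = decide ((pairs[i]'h).2 > 0)) := by
      rw [hrun, ← List.drop_drop, drop_len_takeWhile]

    rw [hdrop, pvGrp_cons]
    simp only [hslice,
      pvBursts_eq pairs (pvRunEnd pairs (decide ((pairs[i]'h).2 > 0)) (i + 1)) hjle, hdropj]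
  · rw [dif_neg h]
    have hnil : pairs.drop i = [] := List.drop_eq_nil_of_le (by omega)
    rw [hnil, pvGrp]
termination_by pairs.length - i
decreasing_by
  have := le_pvRunEnd pairs (decide ((pairs[i]'h).2 > 0)) (i + 1)
  omega

theorem loopA (m : Nat) : ∀ (ts ss : List Int) (a : Nat) (d : Bool)
    (bursts : List (List (Int × Int))) (cur : List (Int × Int)),
    1 ≤ a → a + m = ss.length → ss.length ≤ ts.length → cur ≠ [] →
    d = decide (PySem.List.pyGetD ss ((a : Int) - 1) 0 > 0) →
    (let st :=
      (PySem.List.pyRange (a : Int) ((ss.length : Int)) 1).foldl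
        (fun (st : List (List (Int × Int)) × List (Int × Int)) i =>
          if (decide (PySem.List.pyGetD ss i 0 > 0)) = (decide (PySem.List.pyGetD ss (i - 1) 0 > 0)) then
            (st.1, st.2 ++ [(PySem.List.pyGetD ts i 0, PySem.List.pyGetD ss i 0)])
          else
            (st.1 ++ [st.2], [(PySem.List.pyGetD ts i 0, PySem.List.pyGetD ss i 0)]))
        (bursts, cur)
     if st.2 ≠ [] then st.1 ++ [st.2] else st.1)
    = bursts ++
      (cur ++ (List.zip (ts.drop a) (ss.drop a)).takeWhile (fun q => decide (q.2 > 0) = d)) ::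
        pvGrp ((List.zip (ts.drop a) (ss.drop a)).dropWhile (fun q => decide (q.2 > 0) = d)) := by
  induction m with
  | zero =>
    intro ts ss a d bursts cur ha hm hts hcur hd
    have hnil : PySem.List.pyRange (a : Int) ((ss.length : Int)) 1 = [] :=
      PySem.List.pyRange_one_eq_nil (by exact_mod_cast (by omega : ss.length ≤ a))
    have hsnil : ss.drop a = [] := List.drop_eq_nil_of_le (by omega)
    simp [hnil, hsnil, List.zip_nil_right, hcur, pvGrp]
  | succ m ih =>
    intro ts ss a d bursts cur ha hm hts hcur hd
    have hasz : a < ss.length := by omega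
    have hatz : a < ts.length := by omega
    have hlt : (a : Int) < (ss.length : Int) := by exact_mod_cast hasz
    have hgs : PySem.List.pyGetD ss ((a : Nat) : Int) 0 = ss[a]'hasz := by
      rw [PySem.List.pyGetD_natCast, List.getD_eq_getElem _ _ hasz]
    have hgt : PySem.List.pyGetD ts ((a : Nat) : Int) 0 = ts[a]'hatz := by
      rw [PySem.List.pyGetD_natCast, List.getD_eq_getElem _ _ hatz]
    have hz : List.zip (ts.drop a) (ss.drop a)
        = (ts[a]'hatz, ss[a]'hasz) :: List.zip (ts.drop (a + 1)) (ss.drop (a + 1)) := by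
      rw [List.drop_eq_getElem_cons hatz, List.drop_eq_getElem_cons hasz, List.zip_cons_cons]
    have hd' : decide ((ss[a]'hasz) > 0)
        = decide (PySem.List.pyGetD ss (((a + 1 : Nat) : Int) - 1) 0 > 0) := by
      have : ((a + 1 : Nat) : Int) - 1 = ((a : Nat) : Int) := by push_cast; ring
      rw [this, hgs]
    rw [PySem.List.pyRange_one_cons hlt, List.foldl_cons]
    rw [show ((a : Int) - 1) = ((a : Int) - 1) from rfl] at hd
    by_cases hc : decide ((ss[a]'hasz) > 0) = d
    · have hcond : (decide (PySem.List.pyGetD ss ((a : Int)) 0 > 0))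
          = (decide (PySem.List.pyGetD ss ((a : Int) - 1) 0 > 0)) := by
        rw [hgs, hc, hd]
      rw [if_pos hcond]
      have := ih ts ss (a + 1) (decide ((ss[a]'hasz) > 0)) bursts
        (cur ++ [(PySem.List.pyGetD ts ((a : Int)) 0, PySem.List.pyGetD ss ((a : Int)) 0)])
        (by omega) (by omega) hts (by simp) hd'
      push_cast at this
      rw [this, hz, List.takeWhile_cons, List.dropWhile_cons]
      simp [hc, hgs, hgt]
    · have hcond : ¬ (decide (PySem.List.pyGetD ss ((a : Int)) 0 > 0))
          = (decide (PySem.List.pyGetD ss ((a : Int) - 1) 0 > 0)) := by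
        rw [hgs, ← hd]; exact hc
      rw [if_neg hcond]
      have := ih ts ss (a + 1) (decide ((ss[a]'hasz) > 0)) (bursts ++ [cur])
        ([(PySem.List.pyGetD ts ((a : Int)) 0, PySem.List.pyGetD ss ((a : Int)) 0)])
        (by omega) (by omega) hts (by simp) hd'
      push_cast at this
      rw [this, hz, List.takeWhile_cons, List.dropWhile_cons]
      rw [if_neg (by simp [hc] : ¬ (decide (decide ((ts[a]'hatz, ss[a]'hasz).2 > 0) = d) = true)),
        if_neg (by simp [hc] : ¬ (decide (decide ((ts[a]'hatz, ss[a]'hasz).2 > 0) = d) = true))]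
      rw [pvGrp_cons]
      simp [hgs, hgt]

-- ===== VERDICT (by name: the statement is the Claim_ definition above) =====
theorem extract_bursts_py_spec : Claim_equal_extract_bursts_py := by
  intro times sizes _ hpre
  have hlen : sizes.length ≤ times.length := by
    rcases hpre with h | h
    · simp [h]
    · exact h
  unfold Spec_extract_bursts_py extract_bursts_py extract_bursts_py_alt
  rw [pairs_eq_zip times sizes hlen]
  by_cases hs : sizes = []
  · subst hs
    rw [if_pos rfl, pvBursts_eq _ 0 (by simp)]
    simp [List.zip_nil_right, pvGrp]
  · have h0s : 0 < sizes.length := List.length_pos_of_ne_nil hs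
    have h0t : 0 < times.length := by omega
    rw [if_neg hs, pvBursts_eq _ 0 (by simp), List.drop_zero]
    have hz : List.zip times sizes
        = (times[0]'h0t, sizes[0]'h0s) :: List.zip (times.drop 1) (sizes.drop 1) := by
      conv_lhs => rw [← List.drop_zero (l := times), ← List.drop_zero (l := sizes),
        List.drop_eq_getElem_cons h0t, List.drop_eq_getElem_cons h0s]
      rw [List.zip_cons_cons]
    have hd0 : decide ((sizes[0]'h0s) > 0)
        = decide (PySem.List.pyGetD sizes (((1 : Nat) : Int) - 1) 0 > 0) := by
      have h1 : ((1 : Nat) : Int) - 1 = ((0 : Nat) : Int) := by simp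
      rw [h1, PySem.List.pyGetD_natCast]
      rw [List.getD_eq_getElem _ _ h0s]
    have hA := loopA (sizes.length - 1) times sizes 1 (decide ((sizes[0]'h0s) > 0)) []
      [(PySem.List.pyGetD times 0 0, PySem.List.pyGetD sizes 0 0)]
      (le_refl 1) (by omega) hlen (by simp) hd0
    push_cast at hA
    rw [PySem.List.len_eq, hA, hz, pvGrp_cons]
    have hg0t : PySem.List.pyGetD times 0 0 = times[0]'h0t := by
      rw [PySem.List.pyGetD_zero, List.getD_eq_getElem _ _ h0t]
    have hg0s : PySem.List.pyGetD sizes 0 0 = sizes[0]'h0s := by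
      rw [PySem.List.pyGetD_zero, List.getD_eq_getElem _ _ h0s]
    simp [hg0t, hg0s]
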